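-- pv_equiv track=rewrite | github.com/bitsima/clairvoyance | src/data_extracting/validator.py | is_valid_plate_id
-- ===== SOURCE A (Python) =====
-- def is_valid_plate_id(match: str) -> bool:
--     """
--     Checks if a captured possible plate id is of the exact forms below:
--     "99 X 9999", "99 X 99999"
--     "99 XX 999", "99 XX 9999"
--     "99 XXX 99", "99 XXX 999"
--
--     DISCLAIMER: Does not check if the plate id actually exists. Only checks if the plate id is of appropriate form,
--     according to Turkish standards.
--
--     Args:
--         match (str): a matched string for one of the corresponding patterns of regex
--
--     Returns:
--         bool: whether or not the plate id is of the appropriate form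
--     """
--     masks = [
--         [True, True, False, True, True, True, True],
--         [True, True, False, True, True, True, True, True],
--         [True, True, False, False, True, True, True],
--         [True, True, False, False, True, True, True, True],
--         [True, True, False, False, False, True, True],
--         [True, True, False, False, False, True, True, True],
--     ]
--     # remove any hyphens, dots or spaces from the match
--     new_match_list = list(match.replace("-", "").replace(".", "").replace(" ", ""))
--
--     match_mask = [ch.isnumeric() for ch in new_match_list]
--
--     if match_mask in masks:
--         return True
--     else:
--         return False
-- ===== SOURCE B (Python) =====
-- def _run_false(s, i):
--     # length of the run of False entries starting at index i
--     n = 0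
--     while i < len(s) and not s[i]:
--         i += 1
--         n += 1
--     return n
--
--
-- def is_valid_plate_id(match: str) -> bool:
--     # classify once: True for numeric chars, separators dropped
--     s = [ch.isnumeric() for ch in match if ch not in "-. "]
--     n = len(s)
--     if n == 7 or n == 8:
--         if s[0] and s[1]:
--             L = _run_false(s, 2)
--             return L in (1, 2, 3) and all(s[2 + L:])
--         return False
--     return False
-- ===== Notes on version B (the rewrite author's own statement) =====
-- stated objective: simpler
-- what changed: B replaces A's table of six boolean masks (build the full mask, compare against each) by a positional parse of one filtered pass: length 7 or 8, two leading digits, a run of 1-3 non-digits, all remaining characters digits.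
import Mathlib
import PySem

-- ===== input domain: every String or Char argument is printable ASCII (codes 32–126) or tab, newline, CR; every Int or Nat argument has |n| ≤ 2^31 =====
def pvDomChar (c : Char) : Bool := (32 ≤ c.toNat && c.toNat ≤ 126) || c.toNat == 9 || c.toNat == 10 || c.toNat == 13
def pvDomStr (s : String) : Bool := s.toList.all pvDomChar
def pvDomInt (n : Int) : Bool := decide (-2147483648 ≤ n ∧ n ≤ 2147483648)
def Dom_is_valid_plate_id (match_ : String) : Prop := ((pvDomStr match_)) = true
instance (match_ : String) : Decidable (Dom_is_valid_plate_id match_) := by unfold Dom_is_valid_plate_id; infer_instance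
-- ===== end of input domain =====

-- B replaces A's six-mask table by a positional parse (length, two leading digits,
-- a run of 1-3 non-digits, digits to the end) over one filtered pass; objective: simpler.
-- (ch.isnumeric() is ported as PySem.Chars.isdigit — exact on the printable-ASCII domain.)

-- ===== PORT A =====
def pv_masks : List (List Bool) :=
  [ [true, true, false, true, true, true, true],
    [true, true, false, true, true, true, true, true],
    [true, true, false, false, true, true, true],
    [true, true, false, false, true, true, true, true],
    [true, true, false, false, false, true, true],
    [true, true, false, false, false, true, true, true] ]

def is_valid_plate_id (match_ : String) : Bool :=
  let new_match_list :=
    (PySem.Str.replace (PySem.Str.replace (PySem.Str.replace match_ "-" "") "." "") " " "").toList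
  let match_mask := new_match_list.map PySem.Chars.isdigit
  if pv_masks.contains match_mask then true else false

-- ===== PORT B =====
-- port of Source B's _run_false (the while loop walks the suffix from index i)
def pvRunFalse : List Bool → Nat
  | [] => 0
  | b :: t => if b then 0 else pvRunFalse t + 1

-- body of Source B after building s
def pvCheck (s : List Bool) : Bool :=
  let n := s.length
  if n = 7 ∨ n = 8 then
    if s.getD 0 false && s.getD 1 false then
      let L := pvRunFalse (s.drop 2)
      decide (L = 1 ∨ L = 2 ∨ L = 3) && (s.drop (2 + L)).all id
    else false
  else false

def is_valid_plate_id_alt (match_ : String) : Bool :=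
  let s := (match_.toList.filter
      (fun ch => !(ch == '-' || ch == '.' || ch == ' '))).map PySem.Chars.isdigit
  pvCheck s

-- ===== PRECONDITION & SPEC =====
def Spec_is_valid_plate_id (match_ : String) (out : Bool) : Prop := out = is_valid_plate_id_alt match_
instance (match_ : String) (out : Bool) : Decidable (Spec_is_valid_plate_id match_ out) := by unfold Spec_is_valid_plate_id; infer_instance

-- ===== CLAIM (what is proved, stated in full; the proofs are below) =====
def Claim_equal_is_valid_plate_id : Prop := ∀ (match_ : String), Dom_is_valid_plate_id match_ → Spec_is_valid_plate_id match_ (is_valid_plate_id match_)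

-- ===== LEMMAS AND PROOFS =====

-- replacing a single character by "" is filtering it out
theorem pv_replace_go_single (c : Char) :
    ∀ (fuel : Nat) (l acc : List Char), l.length ≤ fuel →
      PySem.Chars.replace.go [c] [] fuel l acc = acc.reverse ++ l.filter (fun a => !(a == c)) := by
  intro fuel
  induction fuel with
  | zero =>
      intro l acc h
      have : l = [] := List.length_eq_zero_iff.mp (Nat.le_zero.mp h)
      subst this
      simp [PySem.Chars.replace.go]
  | succ f ih =>
      intro l acc h
      cases l with
      | nil => simp [PySem.Chars.replace.go]
      | cons a t =>
          simp only [PySem.Chars.replace.go]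
          by_cases hac : c = a
          · subst hac
            have hp : [c].isPrefixOf (c :: t) = true := by simp [List.isPrefixOf]
            rw [if_pos hp]
            have hih := ih t acc (by simpa using Nat.le_of_succ_le_succ h)
            simpa [List.filter_cons] using hih
          · have hba : (a == c) = false := beq_eq_false_iff_ne.mpr (fun h' => hac (Eq.symm h'))
            have hp : [c].isPrefixOf (a :: t) = false := by simp [List.isPrefixOf, hac]
            rw [if_neg (by simp [hp])]
            have hih := ih t (a :: acc) (by simpa using Nat.le_of_succ_le_succ h)
            rw [hih]
            simp [hba]

theorem pv_replace_single (l : List Char) (c : Char) :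
    PySem.Chars.replace l [c] [] = l.filter (fun a => !(a == c)) := by
  rw [PySem.Chars.replace]
  simp only [List.isEmpty_cons]
  simpa using pv_replace_go_single c l.length l [] (le_refl _)

theorem pv_strip_chain (l : List Char) :
    ((l.filter (fun a => !(a == '-'))).filter (fun a => !(a == '.'))).filter (fun a => !(a == ' '))
      = l.filter (fun ch => !(ch == '-' || ch == '.' || ch == ' ')) := by
  simp only [List.filter_filter]
  apply List.filter_congr
  intro a _
  cases a == '-' <;> cases a == '.' <;> cases a == ' ' <;> simp

-- mask-table membership coincides with the positional parse, for every boolean list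
theorem pv_core (m : List Bool) : pv_masks.contains m = pvCheck m := by
  rcases m with _ | ⟨b0, _ | ⟨b1, _ | ⟨b2, _ | ⟨b3, _ | ⟨b4, _ | ⟨b5, _ | ⟨b6, _ | ⟨b7, _ | ⟨b8, rest⟩⟩⟩⟩⟩⟩⟩⟩⟩
  · decide
  · revert b0; decide
  · revert b0 b1; decide
  · revert b0 b1 b2; decide
  · revert b0 b1 b2 b3; decide
  · revert b0 b1 b2 b3 b4; decide
  · revert b0 b1 b2 b3 b4 b5; decide
  · revert b0 b1 b2 b3 b4 b5 b6; decide
  · revert b0 b1 b2 b3 b4 b5 b6 b7; decide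
  · -- length ≥ 9: both sides are false
    have hl : (b0 :: b1 :: b2 :: b3 :: b4 :: b5 :: b6 :: b7 :: b8 :: rest).length = 9 + rest.length := by
      simp; omega
    have hb : pvCheck (b0 :: b1 :: b2 :: b3 :: b4 :: b5 :: b6 :: b7 :: b8 :: rest) = false := by
      rw [pvCheck]
      rw [if_neg]
      rw [hl]; omega
    rw [hb]
    simp [pv_masks, List.contains_eq_mem]

-- ===== VERDICT (by name: the statement is the Claim_ definition above) =====
theorem is_valid_plate_id_spec : Claim_equal_is_valid_plate_id := by
  intro match_ _
  unfold Spec_is_valid_plate_id is_valid_plate_id is_valid_plate_id_alt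
  simp only [PySem.Str.toList_replace,
    show "-".toList = ['-'] from rfl, show ".".toList = ['.'] from rfl,
    show " ".toList = [' '] from rfl, show "".toList = [] from rfl]
  rw [pv_replace_single, pv_replace_single, pv_replace_single, pv_strip_chain]
  rw [pv_core]
  split <;> simp_all
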